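-- pv_equiv track=rewrite | github.com/bonexx5/FobbsPay_Blockchain | data_pipeline/etl.py | _create_ranges
-- ===== SOURCE A (Python) =====
-- from typing import Tuple
--
-- from typing import List, Dict, Optional
--
-- def _create_ranges(start: int, end: int, chunks: int) -> List[Tuple[int, int]]:
--     """Create block ranges for parallel processing"""
--     total_blocks = end - start + 1
--     chunk_size = total_blocks // chunks
--     ranges = []
--
--     for i in range(chunks):
--         chunk_start = start + i * chunk_size
--         chunk_end = chunk_start + chunk_size - 1 if i < chunks - 1 else end
--         ranges.append((chunk_start, chunk_end))
--
--     return ranges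
-- ===== SOURCE B (Python) =====
-- from typing import Tuple, List
--
-- def _create_ranges(start: int, end: int, chunks: int) -> List[Tuple[int, int]]:
--     """Create block ranges by divide-and-conquer over the chunk indices."""
--     cs = (end - start + 1) // chunks
--
--     def emit(i):
--         lo = start + i * cs
--         return (lo, end if i == chunks - 1 else lo + cs - 1)
--
--     def rec(i0, i1):
--         if i1 - i0 <= 0:
--             return []
--         if i1 - i0 == 1:
--             return [emit(i0)]
--         mid = (i0 + i1) // 2
--         return rec(i0, mid) + rec(mid, i1)
--
--     return rec(0, chunks)
-- ===== Notes on version B (the rewrite author's own statement) =====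
-- stated objective: alternative
-- what changed: Replaced the linear accumulating loop by binary divide-and-conquer recursion on the chunk-index interval: split the index range at its midpoint, recurse on both halves and concatenate; single chunks are emitted at the leaves.
import Mathlib
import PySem

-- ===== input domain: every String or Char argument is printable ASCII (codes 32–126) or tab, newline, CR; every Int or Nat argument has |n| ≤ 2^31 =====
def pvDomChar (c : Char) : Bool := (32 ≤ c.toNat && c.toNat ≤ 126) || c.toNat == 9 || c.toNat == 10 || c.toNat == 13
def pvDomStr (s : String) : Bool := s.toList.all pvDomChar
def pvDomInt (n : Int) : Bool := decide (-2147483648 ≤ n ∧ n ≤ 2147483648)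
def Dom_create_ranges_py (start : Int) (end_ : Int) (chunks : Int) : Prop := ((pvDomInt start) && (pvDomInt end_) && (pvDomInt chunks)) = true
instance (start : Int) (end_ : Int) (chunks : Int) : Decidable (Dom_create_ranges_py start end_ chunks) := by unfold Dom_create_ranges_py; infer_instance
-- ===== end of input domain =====

-- B replaces A's linear accumulating loop by binary divide-and-conquer recursion
-- on the chunk-index interval; same result, different algorithmic decomposition.

-- ===== PORT A =====
def create_ranges_py (start : Int) (end_ : Int) (chunks : Int) : List (Int × Int) :=
  let total_blocks := end_ - start + 1
  let chunk_size := PySem.Int.floordiv total_blocks chunks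
  (PySem.List.pyRange 0 chunks 1).foldl
    (fun ranges i =>
      let chunk_start := start + i * chunk_size
      let chunk_end := if i < chunks - 1 then chunk_start + chunk_size - 1 else end_
      ranges ++ [(chunk_start, chunk_end)]) []

-- ===== PORT B =====
-- emit(i) from Source B
def pvEmit (start end_ chunks cs i : Int) : Int × Int :=
  let lo := start + i * cs
  (lo, if i = chunks - 1 then end_ else lo + cs - 1)

-- rec(i0, i1) from Source B (binary split of the chunk-index interval);
-- fuel = interval length only makes the recursion structural, never changes the value
def pvRec (start end_ chunks cs : Int) : Nat → Int → Int → List (Int × Int)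
  | 0, _, _ => []
  | fuel + 1, i0, i1 =>
    if i1 - i0 ≤ 0 then []
    else if i1 - i0 = 1 then [pvEmit start end_ chunks cs i0]
    else
      let mid := PySem.Int.floordiv (i0 + i1) 2
      pvRec start end_ chunks cs fuel i0 mid ++ pvRec start end_ chunks cs fuel mid i1

def create_ranges_py_alt (start : Int) (end_ : Int) (chunks : Int) : List (Int × Int) :=
  let cs := PySem.Int.floordiv (end_ - start + 1) chunks
  pvRec start end_ chunks cs chunks.toNat 0 chunks

-- ===== PRECONDITION & SPEC =====
-- chunks = 0 makes A's '//' raise ZeroDivisionError (B's '//' raises there too).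
def Pre_create_ranges_py (start : Int) (end_ : Int) (chunks : Int) : Prop := chunks ≠ 0
instance (start : Int) (end_ : Int) (chunks : Int) : Decidable (Pre_create_ranges_py start end_ chunks) := by unfold Pre_create_ranges_py; infer_instance
def pvWitness_create_ranges_py : Int × Int × Int := (10, 42, 4)

def Spec_create_ranges_py (start : Int) (end_ : Int) (chunks : Int) (out : List (Int × Int)) : Prop := out = create_ranges_py_alt start end_ chunks
instance (start : Int) (end_ : Int) (chunks : Int) (out : List (Int × Int)) : Decidable (Spec_create_ranges_py start end_ chunks out) := by unfold Spec_create_ranges_py; infer_instance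

-- ===== CLAIM =====
def Claim_equal_create_ranges_py : Prop := ∀ (start : Int) (end_ : Int) (chunks : Int), Dom_create_ranges_py start end_ chunks → Pre_create_ranges_py start end_ chunks → Spec_create_ranges_py start end_ chunks (create_ranges_py start end_ chunks)

-- ===== LEMMAS AND PROOFS =====

-- foldl-append is a map
theorem pv_foldl_append_map {α β : Type} (l : List α) (g : α → β) (init : List β) :
    l.foldl (fun acc x => acc ++ [g x]) init = init ++ l.map g := by
  induction l generalizing init with
  | nil => simp
  | cons x xs ih => simp [List.foldl, ih]

-- the D&C recursion computes the map of pvEmit over the index interval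
theorem pv_rec_eq_map (start end_ chunks cs : Int) (fuel : Nat) (i0 i1 : Int)
    (hf : (i1 - i0).toNat ≤ fuel) :
    pvRec start end_ chunks cs fuel i0 i1 =
      (PySem.List.pyRange i0 i1 1).map (pvEmit start end_ chunks cs) := by
  induction fuel generalizing i0 i1 with
  | zero =>
    rw [PySem.List.pyRange_one_eq_nil (by omega)]
    simp [pvRec]
  | succ fuel ih =>
    rw [pvRec]
    by_cases h0 : i1 - i0 ≤ 0
    · rw [PySem.List.pyRange_one_eq_nil (by omega)]; simp [h0]
    · by_cases h1 : i1 - i0 = 1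
      · have : i1 = i0 + 1 := by omega
        subst this
        rw [PySem.List.pyRange_one_singleton]
        simp [h0, h1]
      · have hb := PySem.Int.floordiv_two_mid_bounds (lo := i0) (hi := i1) (by omega)
        have h2 : (2:Int) * PySem.Int.floordiv (i0 + i1) 2 + PySem.Int.mod (i0 + i1) 2 = i0 + i1 := by
          have := PySem.Int.floordiv_mul_add_mod (i0 + i1) 2; linarith
        have hm := PySem.Int.mod_two_eq (i0 + i1)
        set mid := PySem.Int.floordiv (i0 + i1) 2 with hmid
        have hlo : i0 < mid := by omega
        have hhi : mid < i1 := by omega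
        simp only [h0, h1, if_false]
        rw [ih i0 mid (by omega), ih mid i1 (by omega),
            PySem.List.pyRange_one_append i0 mid i1 (by omega) (by omega), List.map_append]

theorem pv_core (start end_ chunks : Int) :
    create_ranges_py start end_ chunks = create_ranges_py_alt start end_ chunks := by
  unfold create_ranges_py create_ranges_py_alt
  rw [pv_foldl_append_map, List.nil_append, pv_rec_eq_map _ _ _ _ _ _ _ (by omega)]
  apply List.map_congr_left
  intro i hi
  have hi' := (PySem.List.mem_pyRange_one).1 hi
  unfold pvEmit
  by_cases hlt : i < chunks - 1
  · simp [hlt, show i ≠ chunks - 1 by omega]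
  · simp [show i = chunks - 1 by omega]

-- ===== VERDICT =====
theorem create_ranges_py_spec : Claim_equal_create_ranges_py := by
  intro start end_ chunks _ _
  exact pv_core start end_ chunks
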